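-- pv_equiv track=rewrite | github.com/DoroninDobroCorp/health-food | app/rules.py | vitamin_recommendations
-- ===== SOURCE A (Python) =====
-- from typing import Dict, Any, List
--
-- def vitamin_recommendations(labs: Dict[str, float], deficits: List[Dict[str, Any]]):
--     recs = []
--     markers = {d["marker"] for d in deficits}
--
--     if "vitamin_d" in markers:
--         recs.append({
--             "name": "Vitamin D3",
--             "dose": "1000–2000 IU/day",
--             "note": "Adjust after re-test; take with fat.",
--         })
--     if "b12" in markers:
--         recs.append({
--             "name": "Vitamin B12",
--             "dose": "500–1000 mcg/day (if vegan) or per need",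
--             "note": "Sublingual acceptable.",
--         })
--     if "iron" in markers:
--         recs.append({
--             "name": "Iron (bisglycinate)",
--             "dose": "18–27 mg/day",
--             "note": "Away from coffee/tea and calcium; confirm with doctor if severe.",
--         })
--     if "triglycerides" in markers or "ldl" in markers:
--         recs.append({
--             "name": "Omega-3 (EPA/DHA)",
--             "dose": "1–2 g/day",
--             "note": "Or fish 2–3x/week.",
--         })
--
--     recs.append({
--         "disclaimer": "Educational use only. Not medical advice. Re-test in 8–12 weeks."
--     })
--     return recs
-- ===== SOURCE B (Python) =====
-- from typing import Dict, Any, List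
--
-- _BITS = {"vitamin_d": 1, "b12": 2, "iron": 4, "triglycerides": 8, "ldl": 8}
--
-- _RECS = [
--     (1, {
--         "name": "Vitamin D3",
--         "dose": "1000–2000 IU/day",
--         "note": "Adjust after re-test; take with fat.",
--     }),
--     (2, {
--         "name": "Vitamin B12",
--         "dose": "500–1000 mcg/day (if vegan) or per need",
--         "note": "Sublingual acceptable.",
--     }),
--     (4, {
--         "name": "Iron (bisglycinate)",
--         "dose": "18–27 mg/day",
--         "note": "Away from coffee/tea and calcium; confirm with doctor if severe.",
--     }),
--     (8, {
--         "name": "Omega-3 (EPA/DHA)",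
--         "dose": "1–2 g/day",
--         "note": "Or fish 2–3x/week.",
--     }),
-- ]
--
-- def vitamin_recommendations(labs, deficits):
--     mask = 0
--     for d in deficits:
--         mask |= _BITS.get(d["marker"], 0)
--     recs = [dict(rec) for bit, rec in _RECS if mask & bit]
--     recs.append({
--         "disclaimer": "Educational use only. Not medical advice. Re-test in 8–12 weeks."
--     })
--     return recs
-- ===== Notes on version B (the rewrite author's own statement) =====
-- stated objective: alternative
-- what changed: Replaces A's marker-set construction plus four hard-coded membership-test branches with a single fold over the deficits that ORs per-marker bits into an integer mask, then selects recommendations by bit-testing the mask against a (bit, rec) table.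
import Mathlib
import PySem

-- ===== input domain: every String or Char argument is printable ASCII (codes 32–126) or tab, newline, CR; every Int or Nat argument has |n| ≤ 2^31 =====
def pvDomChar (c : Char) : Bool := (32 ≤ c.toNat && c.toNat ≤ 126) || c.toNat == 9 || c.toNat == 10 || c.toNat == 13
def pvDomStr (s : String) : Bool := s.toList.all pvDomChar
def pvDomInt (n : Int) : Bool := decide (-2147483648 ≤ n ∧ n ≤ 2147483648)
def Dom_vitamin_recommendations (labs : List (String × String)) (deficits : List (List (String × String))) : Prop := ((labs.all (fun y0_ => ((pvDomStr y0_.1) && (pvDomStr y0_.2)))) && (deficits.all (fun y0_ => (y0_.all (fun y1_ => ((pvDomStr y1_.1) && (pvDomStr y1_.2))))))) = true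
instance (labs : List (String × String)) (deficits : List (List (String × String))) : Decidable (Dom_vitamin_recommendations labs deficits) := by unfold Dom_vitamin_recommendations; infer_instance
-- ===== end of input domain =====

-- B replaces A's marker-set + four membership-test branches with one fold ORing per-marker
-- bits into an integer mask and a bit-test over a (bit, rec) table; return value only.

-- ===== PORT A =====
-- d["marker"]: Pre_ guarantees the key is present, so getD "" never fires
def pvMarker (d : List (String × String)) : String :=
  ((PySem.Dict.mk d).get? "marker").getD ""

def vitamin_recommendations (labs : List (String × String)) (deficits : List (List (String × String))) : List (List (String × String)) :=
  let markers := PySem.Set.ofList (deficits.map pvMarker)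
  let recs : List (List (String × String)) := []
  let recs := if PySem.Set.contains markers "vitamin_d" then
      recs ++ [[("name", "Vitamin D3"), ("dose", "1000–2000 IU/day"), ("note", "Adjust after re-test; take with fat.")]]
    else recs
  let recs := if PySem.Set.contains markers "b12" then
      recs ++ [[("name", "Vitamin B12"), ("dose", "500–1000 mcg/day (if vegan) or per need"), ("note", "Sublingual acceptable.")]]
    else recs
  let recs := if PySem.Set.contains markers "iron" then
      recs ++ [[("name", "Iron (bisglycinate)"), ("dose", "18–27 mg/day"), ("note", "Away from coffee/tea and calcium; confirm with doctor if severe.")]]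
    else recs
  let recs := if PySem.Set.contains markers "triglycerides" || PySem.Set.contains markers "ldl" then
      recs ++ [[("name", "Omega-3 (EPA/DHA)"), ("dose", "1–2 g/day"), ("note", "Or fish 2–3x/week.")]]
    else recs
  recs ++ [[("disclaimer", "Educational use only. Not medical advice. Re-test in 8–12 weeks.")]]

-- ===== PORT B =====
def pvBits : PySem.Dict String Nat :=
  PySem.Dict.mk [("vitamin_d", 1), ("b12", 2), ("iron", 4), ("triglycerides", 8), ("ldl", 8)]

def pvRecs : List (Nat × List (String × String)) :=
  [ (1, [("name", "Vitamin D3"), ("dose", "1000–2000 IU/day"), ("note", "Adjust after re-test; take with fat.")]),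
    (2, [("name", "Vitamin B12"), ("dose", "500–1000 mcg/day (if vegan) or per need"), ("note", "Sublingual acceptable.")]),
    (4, [("name", "Iron (bisglycinate)"), ("dose", "18–27 mg/day"), ("note", "Away from coffee/tea and calcium; confirm with doctor if severe.")]),
    (8, [("name", "Omega-3 (EPA/DHA)"), ("dose", "1–2 g/day"), ("note", "Or fish 2–3x/week.")]) ]

def vitamin_recommendations_alt (labs : List (String × String)) (deficits : List (List (String × String))) : List (List (String × String)) :=
  let mask := deficits.foldl (fun m d => m ||| pvBits.getD (((PySem.Dict.mk d).get? "marker").getD "") 0) 0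
  ((pvRecs.filter (fun p => mask &&& p.1 != 0)).map (fun p => p.2))
    ++ [[("disclaimer", "Educational use only. Not medical advice. Re-test in 8–12 weeks.")]]

-- ===== PRECONDITION & SPEC =====
-- A raises KeyError on d["marker"] when a deficit dict lacks the key "marker"; Pre_ excludes exactly those inputs.
def Pre_vitamin_recommendations (labs : List (String × String)) (deficits : List (List (String × String))) : Prop :=
  (deficits.all (fun d => (PySem.Dict.mk d).contains "marker")) = true
instance (labs : List (String × String)) (deficits : List (List (String × String))) : Decidable (Pre_vitamin_recommendations labs deficits) := by unfold Pre_vitamin_recommendations; infer_instance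

def pvWitness_vitamin_recommendations : (List (String × String)) × (List (List (String × String))) :=
  ([("vitamin_d", "12.5")], [[("marker", "vitamin_d")], [("marker", "iron")]])

def Spec_vitamin_recommendations (labs : List (String × String)) (deficits : List (List (String × String))) (out : List (List (String × String))) : Prop := out = vitamin_recommendations_alt labs deficits
instance (labs : List (String × String)) (deficits : List (List (String × String))) (out : List (List (String × String))) : Decidable (Spec_vitamin_recommendations labs deficits out) := by unfold Spec_vitamin_recommendations; infer_instance

-- ===== CLAIM =====
def Claim_equal_vitamin_recommendations : Prop := ∀ (labs : List (String × String)) (deficits : List (List (String × String))), Dom_vitamin_recommendations labs deficits → Pre_vitamin_recommendations labs deficits → Spec_vitamin_recommendations labs deficits (vitamin_recommendations labs deficits)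

-- ===== LEMMAS AND PROOFS =====

-- A bit of the OR-fold mask is set iff some deficit contributes that bit.
theorem pv_mask_and_ne (b : Nat) (l : List (List (String × String))) (m : Nat) :
    ((l.foldl (fun m d => m ||| pvBits.getD (((PySem.Dict.mk d).get? "marker").getD "") 0) m) &&& b ≠ 0)
      ↔ (m &&& b ≠ 0 ∨ l.any (fun d => pvBits.getD (((PySem.Dict.mk d).get? "marker").getD "") 0 &&& b ≠ 0)) := by
  induction l generalizing m with
  | nil => simp
  | cons d t ih =>
      have hz : ∀ x y : Nat, (x ||| y = 0) ↔ (x = 0 ∧ y = 0) := by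
        intro x y
        constructor
        · intro h; have h1 := Nat.left_le_or (n := x) (m := y); have h2 := Nat.right_le_or (n := x) (m := y); omega
        · rintro ⟨rfl, rfl⟩; rfl
      simp only [List.foldl_cons, List.any_cons, ih, Nat.and_or_distrib_right, ne_eq, hz, not_and_or, Bool.or_eq_true, decide_eq_true_eq]
      tauto

theorem pv_bit1 (s : String) : (pvBits.getD s 0 &&& 1 ≠ 0) ↔ s = "vitamin_d" := by
  by_cases h1 : s = "vitamin_d"
  · subst h1; decide
  by_cases h2 : s = "b12"
  · subst h2; decide
  by_cases h3 : s = "iron"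
  · subst h3; decide
  by_cases h4 : s = "triglycerides"
  · subst h4; decide
  by_cases h5 : s = "ldl"
  · subst h5; decide
  have e1 : ("vitamin_d" == s) = false := beq_eq_false_iff_ne.mpr (Ne.symm h1)
  have e2 : ("b12" == s) = false := beq_eq_false_iff_ne.mpr (Ne.symm h2)
  have e3 : ("iron" == s) = false := beq_eq_false_iff_ne.mpr (Ne.symm h3)
  have e4 : ("triglycerides" == s) = false := beq_eq_false_iff_ne.mpr (Ne.symm h4)
  have e5 : ("ldl" == s) = false := beq_eq_false_iff_ne.mpr (Ne.symm h5)
  simp [pvBits, PySem.Dict.getD, PySem.Dict.get?, List.find?, e1, e2, e3, e4, e5, h1]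

theorem pv_bit2 (s : String) : (pvBits.getD s 0 &&& 2 ≠ 0) ↔ s = "b12" := by
  by_cases h1 : s = "vitamin_d"
  · subst h1; decide
  by_cases h2 : s = "b12"
  · subst h2; decide
  by_cases h3 : s = "iron"
  · subst h3; decide
  by_cases h4 : s = "triglycerides"
  · subst h4; decide
  by_cases h5 : s = "ldl"
  · subst h5; decide
  have e1 : ("vitamin_d" == s) = false := beq_eq_false_iff_ne.mpr (Ne.symm h1)
  have e2 : ("b12" == s) = false := beq_eq_false_iff_ne.mpr (Ne.symm h2)
  have e3 : ("iron" == s) = false := beq_eq_false_iff_ne.mpr (Ne.symm h3)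
  have e4 : ("triglycerides" == s) = false := beq_eq_false_iff_ne.mpr (Ne.symm h4)
  have e5 : ("ldl" == s) = false := beq_eq_false_iff_ne.mpr (Ne.symm h5)
  simp [pvBits, PySem.Dict.getD, PySem.Dict.get?, List.find?, e1, e2, e3, e4, e5, h2]

theorem pv_bit4 (s : String) : (pvBits.getD s 0 &&& 4 ≠ 0) ↔ s = "iron" := by
  by_cases h1 : s = "vitamin_d"
  · subst h1; decide
  by_cases h2 : s = "b12"
  · subst h2; decide
  by_cases h3 : s = "iron"
  · subst h3; decide
  by_cases h4 : s = "triglycerides"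
  · subst h4; decide
  by_cases h5 : s = "ldl"
  · subst h5; decide
  have e1 : ("vitamin_d" == s) = false := beq_eq_false_iff_ne.mpr (Ne.symm h1)
  have e2 : ("b12" == s) = false := beq_eq_false_iff_ne.mpr (Ne.symm h2)
  have e3 : ("iron" == s) = false := beq_eq_false_iff_ne.mpr (Ne.symm h3)
  have e4 : ("triglycerides" == s) = false := beq_eq_false_iff_ne.mpr (Ne.symm h4)
  have e5 : ("ldl" == s) = false := beq_eq_false_iff_ne.mpr (Ne.symm h5)
  simp [pvBits, PySem.Dict.getD, PySem.Dict.get?, List.find?, e1, e2, e3, e4, e5, h3]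

theorem pv_bit8 (s : String) : (pvBits.getD s 0 &&& 8 ≠ 0) ↔ (s = "triglycerides" ∨ s = "ldl") := by
  by_cases h1 : s = "vitamin_d"
  · subst h1; decide
  by_cases h2 : s = "b12"
  · subst h2; decide
  by_cases h3 : s = "iron"
  · subst h3; decide
  by_cases h4 : s = "triglycerides"
  · subst h4; decide
  by_cases h5 : s = "ldl"
  · subst h5; decide
  have e1 : ("vitamin_d" == s) = false := beq_eq_false_iff_ne.mpr (Ne.symm h1)
  have e2 : ("b12" == s) = false := beq_eq_false_iff_ne.mpr (Ne.symm h2)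
  have e3 : ("iron" == s) = false := beq_eq_false_iff_ne.mpr (Ne.symm h3)
  have e4 : ("triglycerides" == s) = false := beq_eq_false_iff_ne.mpr (Ne.symm h4)
  have e5 : ("ldl" == s) = false := beq_eq_false_iff_ne.mpr (Ne.symm h5)
  simp [pvBits, PySem.Dict.getD, PySem.Dict.get?, List.find?, e1, e2, e3, e4, e5, h4, h5]

-- ===== VERDICT =====
theorem vitamin_recommendations_spec : Claim_equal_vitamin_recommendations := by
  intro labs deficits _ _
  unfold Spec_vitamin_recommendations vitamin_recommendations vitamin_recommendations_alt
  simp only [List.filter, pvRecs]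
  set mask := deficits.foldl (fun m d => m ||| pvBits.getD (((PySem.Dict.mk d).get? "marker").getD "") 0) 0 with hmask
  have key : ∀ (b : Nat) (P : String → Prop) (_ : DecidablePred P),
      (∀ t, (pvBits.getD t 0 &&& b ≠ 0) ↔ P t) →
      ((mask &&& b != 0) = decide (∃ x, x ∈ deficits.map pvMarker ∧ P x)) := by
    intro b P _ hb
    rw [hmask]
    apply Bool.eq_iff_iff.mpr
    simp only [bne_iff_ne, ne_eq, decide_eq_true_eq]
    rw [show (¬ (List.foldl (fun m d => m ||| pvBits.getD (((PySem.Dict.mk d).get? "marker").getD "") 0) 0 deficits) &&& b = 0) ↔ _ from pv_mask_and_ne b deficits 0]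
    simp [hb, pvMarker, List.mem_map]
  have hc1 := key 1 (fun t => t = "vitamin_d") (by infer_instance) pv_bit1
  have hc2 := key 2 (fun t => t = "b12") (by infer_instance) pv_bit2
  have hc4 := key 4 (fun t => t = "iron") (by infer_instance) pv_bit4
  have hc8 := key 8 (fun t => t = "triglycerides" ∨ t = "ldl") (by infer_instance) pv_bit8
  simp only [exists_eq_right] at hc1 hc2 hc4
  simp only [and_or_left, exists_or, exists_eq_right, Bool.decide_or] at hc8
  rw [hc1, hc2, hc4, hc8]
  have hset : ∀ (k : String), PySem.Set.contains (PySem.Set.ofList (deficits.map pvMarker)) k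
      = decide (k ∈ deficits.map pvMarker) := by
    intro k
    simp [PySem.Set.contains, PySem.Set.mem_ofList]
  rw [hset, hset, hset, hset]
  by_cases m1 : "vitamin_d" ∈ deficits.map pvMarker <;>
  by_cases m2 : "b12" ∈ deficits.map pvMarker <;>
  by_cases m3 : "iron" ∈ deficits.map pvMarker <;>
  by_cases m4 : "triglycerides" ∈ deficits.map pvMarker <;>
  by_cases m5 : "ldl" ∈ deficits.map pvMarker <;>
  simp [m1, m2, m3, m4, m5]
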